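-- pv_equiv track=rewrite | github.com/m7mdony/GPC-FTW | 2015/c.py | calculate
-- ===== SOURCE A (Python) =====
-- def calculate(num_of_courses,student_course):
--     course_map={}
--     unique_courses=[]
--     #add lists for all the courses taken by a student
--     for map in student_course:
--         if map[1] not in unique_courses:
--             unique_courses.append(map[1])
--         #if the student doesnt exist add it
--         if map[0] not in course_map:
--
--             course_map[map[0]]=[map[1]]
--
--         else:
--             #if the student doesnt exist for the course add him
--             if map[1] not in course_map[map[0]]:
--                 course_map[map[0]].append(map[1])
--             #if the student already registerd skip the record
--             else:
--                 continue
--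
--
--
--
--     length= len(unique_courses)
--     graph= [['0' for i in range(length)] for j in range(length)]
--
--     for i in range(length):
--         for j in range(length):
--             if i ==j:
--                 continue
--             else:
--                 for key in course_map:
--                     if unique_courses[i] in course_map[key] and unique_courses[j] in course_map[key]:
--                         graph[i][j]='1'
--                         graph[j][i]='1'
--
--
--     return graph
-- ===== SOURCE B (Python) =====
-- def calculate(num_of_courses, student_course):
--     # Index courses by first appearance; per student collect distinct course indices,
--     # then mark every co-taken ordered pair as an edge and render the matrix from the set.
--     course_index = {}
--     enrolled = {}
--     for rec in student_course:
--         s, c = rec[0], rec[1]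
--         if c not in course_index:
--             course_index[c] = len(course_index)
--         k = course_index[c]
--         ids = enrolled.get(s, [])
--         enrolled[s] = ids if k in ids else ids + [k]
--     n = len(course_index)
--     edges = set()
--     for ids in enrolled.values():
--         for a in ids:
--             for b in ids:
--                 if a != b:
--                     edges.add((a, b))
--     return [['1' if (i, j) in edges else '0' for j in range(n)] for i in range(n)]
-- ===== Notes on version B (the rewrite author's own statement) =====
-- stated objective: alternative
-- what changed: B replaces A's triple loop over all course pairs and all students (rescanning every student's course list per pair) by a course->index dict and per-student marking of co-taken index pairs in an edge set, then renders the matrix from the set.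
-- outside the precondition, e.g. on calculate(1, [['alice']]): A raises IndexError, B raises IndexError
import Mathlib
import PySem

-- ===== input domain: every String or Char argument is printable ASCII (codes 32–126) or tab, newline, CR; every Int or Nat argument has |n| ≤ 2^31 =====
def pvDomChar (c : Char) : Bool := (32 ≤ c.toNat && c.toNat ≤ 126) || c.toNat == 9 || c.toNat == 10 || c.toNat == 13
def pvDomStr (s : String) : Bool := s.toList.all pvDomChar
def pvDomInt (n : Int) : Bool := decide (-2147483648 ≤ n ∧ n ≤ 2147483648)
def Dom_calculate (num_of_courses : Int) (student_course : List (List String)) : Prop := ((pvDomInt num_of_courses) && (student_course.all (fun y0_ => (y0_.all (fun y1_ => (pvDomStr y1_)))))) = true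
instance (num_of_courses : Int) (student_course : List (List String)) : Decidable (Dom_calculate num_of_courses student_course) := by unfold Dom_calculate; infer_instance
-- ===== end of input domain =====

-- B replaces A's triple scan over all matrix cells and all students by a course index and a
-- per-student co-enrollment edge set (a different algorithm, same observable result); the
-- equality of the returned matrices is proved below.

-- ===== PORT A =====
-- one record of the first loop: s = map[0], c = map[1] (pyGetD is exact under Pre_: len(rec) ≥ 2)
def calcStepA (st : PySem.Dict String (List String) × List String) (rec : List String) :
    PySem.Dict String (List String) × List String :=
  let s := PySem.List.pyGetD rec 0 ""
  let c := PySem.List.pyGetD rec 1 ""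
  let uc := if c ∈ st.2 then st.2 else st.2 ++ [c]
  let cm :=
    if st.1.contains s = false then st.1.insert s [c]
    else
      let l := st.1.getD s []
      if c ∈ l then st.1 else st.1.insert s (l ++ [c])
  (cm, uc)

-- graph[i][j] = '1'  (in-place list update; exact: indices produced by range are in range)
def setCell (g : List (List String)) (i j : Int) : List (List String) :=
  PySem.List.pySetD g i (PySem.List.pySetD (PySem.List.pyGetD g i []) j "1")

def calculate (num_of_courses : Int) (student_course : List (List String)) : List (List String) :=
  let st := student_course.foldl calcStepA (PySem.Dict.empty, [])
  let course_map := st.1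
  let unique_courses := st.2
  let length : Int := (unique_courses.length : Int)
  let graph := (PySem.List.pyRange 0 length 1).map
    (fun _ => (PySem.List.pyRange 0 length 1).map (fun _ => "0"))
  (PySem.List.pyRange 0 length 1).foldl (fun g i =>
    (PySem.List.pyRange 0 length 1).foldl (fun g j =>
      if i = j then g
      else course_map.keys.foldl (fun g key =>
        if PySem.List.pyGetD unique_courses i "" ∈ course_map.getD key [] ∧
           PySem.List.pyGetD unique_courses j "" ∈ course_map.getD key []
        then setCell (setCell g i j) j i
        else g) g) g) graph

-- ===== PORT B =====
-- one record of B's loop: index the course, add its index to the student's dedup'd list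
-- (Python's `enrolled[s] = ids if k in ids else ids + [k]` re-assigns the identical value
--  when k ∈ ids, which leaves the dict unchanged; ported as the unchanged dict)
def calcStepB (st : PySem.Dict String Int × PySem.Dict String (List Int)) (rec : List String) :
    PySem.Dict String Int × PySem.Dict String (List Int) :=
  let s := PySem.List.pyGetD rec 0 ""
  let c := PySem.List.pyGetD rec 1 ""
  let ci := if st.1.contains c then st.1 else st.1.insert c (st.1.size : Int)
  let k := ci.getD c 0
  let ids := st.2.getD s []
  let enr := if k ∈ ids then st.2 else st.2.insert s (ids ++ [k])
  (ci, enr)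

def calculate_alt (num_of_courses : Int) (student_course : List (List String)) : List (List String) :=
  let st := student_course.foldl calcStepB (PySem.Dict.empty, PySem.Dict.empty)
  let course_index := st.1
  let enrolled := st.2
  let n : Int := (course_index.size : Int)
  let edges : PySem.Set (Int × Int) := enrolled.values.foldl (fun e ids =>
    ids.foldl (fun e a => ids.foldl (fun e b =>
      if a = b then e else PySem.Set.add e (a, b)) e) e) PySem.Set.empty
  (PySem.List.pyRange 0 n 1).map (fun i => (PySem.List.pyRange 0 n 1).map
    (fun j => if edges.contains (i, j) then "1" else "0"))

-- ===== PRECONDITION & SPEC =====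
-- Pre_ excludes exactly the inputs where Python A raises IndexError (a record with < 2 fields)
def Pre_calculate (num_of_courses : Int) (student_course : List (List String)) : Prop :=
  ∀ rec ∈ student_course, 2 ≤ rec.length
instance (num_of_courses : Int) (student_course : List (List String)) :
    Decidable (Pre_calculate num_of_courses student_course) := by
  unfold Pre_calculate; infer_instance

def pvWitness_calculate : Int × List (List String) :=
  (3, [["alice", "math"], ["alice", "cs"], ["bob", "cs"], ["bob", "art"], ["alice", "math"]])

def Spec_calculate (num_of_courses : Int) (student_course : List (List String)) (out : List (List String)) : Prop := out = calculate_alt num_of_courses student_course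
instance (num_of_courses : Int) (student_course : List (List String)) (out : List (List String)) : Decidable (Spec_calculate num_of_courses student_course out) := by unfold Spec_calculate; infer_instance

-- ===== CLAIM (what is proved, stated in full; the proofs are below) =====
def Claim_equal_calculate : Prop := ∀ (num_of_courses : Int) (student_course : List (List String)), Dom_calculate num_of_courses student_course → Pre_calculate num_of_courses student_course → Spec_calculate num_of_courses student_course (calculate num_of_courses student_course)

-- ===== LEMMAS AND PROOFS =====

-- ---- phase 1: the joint loop invariant relating A's (course_map, unique_courses)
-- ---- to B's (course_index, enrolled) ----

def idxI (uc : List String) (c : String) : Int := (uc.idxOf c : Int)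

def CInv (cm : PySem.Dict String (List String)) (uc : List String)
    (ci : PySem.Dict String Int) (enr : PySem.Dict String (List Int)) : Prop :=
  uc.Nodup ∧
  cm.keys.Nodup ∧
  ci.keys = uc ∧
  (∀ c ∈ uc, ci.getD c 0 = idxI uc c) ∧
  ci.size = uc.length ∧
  enr.items = cm.items.map (fun p => (p.1, p.2.map (idxI uc))) ∧
  (∀ p ∈ cm.items, ∀ c ∈ p.2, c ∈ uc)

lemma inv_init : CInv PySem.Dict.empty [] PySem.Dict.empty PySem.Dict.empty := by
  refine ⟨by simp, by simp, by simp, by simp, by simp, by simp [PySem.Dict.empty], by simp [PySem.Dict.empty]⟩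

lemma enr_get?_of_items {cm : PySem.Dict String (List String)} {uc : List String}
    {enr : PySem.Dict String (List Int)}
    (h : enr.items = cm.items.map (fun p => (p.1, p.2.map (idxI uc)))) (s : String) :
    enr.get? s = (cm.get? s).map (fun l => l.map (idxI uc)) := by
  simp only [PySem.Dict.get?, h, List.find?_map, Option.map_map]
  rfl

lemma idxOf_mem_inj {uc : List String} (hnd : uc.Nodup) {a b : String}
    (ha : a ∈ uc) (hb : b ∈ uc) (h : uc.idxOf a = uc.idxOf b) : a = b := by
  have h1 := List.getElem_idxOf (List.idxOf_lt_length_of_mem ha)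
  have h2 := List.getElem_idxOf (List.idxOf_lt_length_of_mem hb)
  rw [← h1, ← h2]
  congr 1

lemma idxOf_append_of_mem' {uc : List String} {c a : String} (ha : a ∈ uc) :
    (uc ++ [c]).idxOf a = uc.idxOf a := List.idxOf_append_of_mem ha

lemma inv_step (cm : PySem.Dict String (List String)) (uc : List String)
    (ci : PySem.Dict String Int) (enr : PySem.Dict String (List Int)) (rec : List String)
    (h : CInv cm uc ci enr) :
    CInv (calcStepA (cm, uc) rec).1 (calcStepA (cm, uc) rec).2
        (calcStepB (ci, enr) rec).1 (calcStepB (ci, enr) rec).2 := by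
  obtain ⟨hnd, hknd, hcik, hcig, hcis, hitems, hsub⟩ := h
  set s := PySem.List.pyGetD rec 0 "" with hs
  set c := PySem.List.pyGetD rec 1 "" with hc
  simp only [calcStepA, calcStepB, ← hs, ← hc]
  -- the course-side state
  have hcontains : ci.contains c = true ↔ c ∈ uc := by
    rw [PySem.Dict.contains_iff_mem_keys, hcik]
  set uc' := if c ∈ uc then uc else uc ++ [c] with huc'
  set ci' := if ci.contains c = true then ci else ci.insert c (ci.size : Int) with hci'
  have hsubset : ∀ a ∈ uc, a ∈ uc' := by
    intro a ha; rw [huc']; split <;> simp [ha]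
  have hcmem : c ∈ uc' := by
    rw [huc']; split
    · assumption
    · simp
  have hstable : ∀ a ∈ uc, uc'.idxOf a = uc.idxOf a := by
    intro a ha; rw [huc']; split
    · rfl
    · exact idxOf_append_of_mem' ha
  have hnd' : uc'.Nodup := by
    rw [huc']; split
    · exact hnd
    · rename_i hcn
      simp [List.nodup_append, hnd]
      intro a ha rfl; exact hcn ha
  have hkeys' : ci'.keys = uc' := by
    rw [hci', huc']
    by_cases hcm : c ∈ uc
    · simp [hcontains.mpr hcm, hcm, hcik]
    · have : ci.contains c = false := by
        rw [← Bool.not_eq_true, hcontains]; exact hcm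
      simp [this, hcm, PySem.Dict.keys_insert_of_not_contains ci _ this, hcik]
  have hsize' : ci'.size = uc'.length := by
    rw [hci', huc']
    by_cases hcm : c ∈ uc
    · simp [hcontains.mpr hcm, hcm, hcis]
    · have : ci.contains c = false := by
        rw [← Bool.not_eq_true, hcontains]; exact hcm
      simp [this, hcm, PySem.Dict.size_insert, hcis]
  have hget' : ∀ a ∈ uc', ci'.getD a 0 = idxI uc' a := by
    intro a ha
    rw [hci']
    by_cases hcm : c ∈ uc
    · have huu : uc' = uc := by rw [huc']; simp [hcm]
      rw [huu] at ha
      simp only [hcontains.mpr hcm, if_true]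
      rw [hcig a ha, idxI, idxI, huu]
    · have hf : ci.contains c = false := by
        rw [← Bool.not_eq_true, hcontains]; exact hcm
      have huu : uc' = uc ++ [c] := by rw [huc']; simp [hcm]
      simp only [hf, Bool.false_eq_true, if_false]
      rw [huu] at ha
      rcases List.mem_append.mp ha with ha' | ha'
      · have hne : a ≠ c := by rintro rfl; exact hcm ha'
        rw [PySem.Dict.getD_insert_of_ne ci _ _ hne, hcig a ha', idxI, idxI, huu,
          idxOf_append_of_mem' ha']
      · have ha2 : a = c := by simpa using ha'
        rw [ha2, PySem.Dict.getD_insert_self, idxI, huu]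
        have h9 : (uc ++ [c]).idxOf c = uc.length := by simp [List.idxOf_append, hcm]
        rw [h9, hcis]
  -- the index of the current course
  have hk : ci'.getD c 0 = idxI uc' c := hget' c hcmem
  -- stability of the per-student mapping
  have hmapstable : ∀ l : List String, (∀ a ∈ l, a ∈ uc) → l.map (idxI uc') = l.map (idxI uc) := by
    intro l hl
    apply List.map_congr_left
    intro a ha
    rw [idxI, idxI, hstable a (hl a ha)]
  have holditems : enr.items = cm.items.map (fun p => (p.1, p.2.map (idxI uc'))) := by
    rw [hitems]
    apply List.map_congr_left
    intro p hp
    rw [hmapstable p.2 (hsub p hp)]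
  -- the student-side state
  have henrget : enr.get? s = (cm.get? s).map (fun l => l.map (idxI uc)) := enr_get?_of_items hitems s
  set l0 := cm.getD s [] with hl0
  have hids_eq : enr.getD s [] = l0.map (idxI uc) := by
    rw [hl0, PySem.Dict.getD_eq_get?_getD, PySem.Dict.getD_eq_get?_getD, henrget]
    cases cm.get? s <;> simp
  have hl0sub : ∀ a ∈ l0, a ∈ uc := by
    rw [hl0, PySem.Dict.getD_eq_get?_getD]
    cases hgs : cm.get? s with
    | none => simp
    | some l =>
      simpa using hsub (s, l) (PySem.Dict.mem_items_of_get?_eq_some cm hgs)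
  have hkin : ci'.getD c 0 ∈ enr.getD s [] ↔ c ∈ l0 := by
    rw [hids_eq, hk]
    constructor
    · intro hmem
      rcases List.mem_map.mp hmem with ⟨c', hc', he⟩
      have hc'uc : c' ∈ uc := hl0sub c' hc'
      have heq : uc'.idxOf c' = uc'.idxOf c := by
        rw [hstable c' hc'uc]
        simp only [idxI] at he
        exact_mod_cast he
      have := idxOf_mem_inj hnd' (hsubset c' hc'uc) hcmem heq
      rwa [← this]
    · intro hcl
      have hcuc : c ∈ uc := hl0sub c hcl
      refine List.mem_map.mpr ⟨c, hcl, ?_⟩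
      rw [idxI, idxI, hstable c hcuc]
  refine ⟨hnd', ?_, hkeys', hget', hsize', ?_, ?_⟩
  all_goals by_cases hsk : cm.contains s = false
  -- goal 1: keys of A's dict stay Nodup
  · have hnk : s ∉ cm.keys := by
      rw [← PySem.Dict.contains_iff_mem_keys]; simp [hsk]
    rw [if_pos hsk, PySem.Dict.keys_insert_of_not_contains cm _ hsk]
    simp [List.nodup_append, hknd]
    intro a ha rfl; exact hnk ha
  · rw [if_neg (by simpa using hsk)]
    split
    · exact hknd
    · rw [PySem.Dict.keys_insert_of_contains cm _ (by simpa using hsk)]; exact hknd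
  -- goal 2: the items of B's dict mirror A's
  · have hgs : cm.get? s = none := (PySem.Dict.get?_eq_none_iff_contains cm s).mpr hsk
    have hl0e : l0 = [] := by rw [hl0]; exact PySem.Dict.getD_of_not_contains cm [] hsk
    have hideq : enr.getD s [] = [] := by rw [hids_eq, hl0e]; rfl
    have hkno : ¬ ci'.getD c 0 ∈ enr.getD s [] := by rw [hideq]; simp
    have henrc : enr.contains s = false := by
      rw [← PySem.Dict.get?_eq_none_iff_contains, henrget, hgs]; rfl
    rw [if_pos hsk, if_neg hkno,
      PySem.Dict.items_insert_of_not_contains enr _ henrc,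
      PySem.Dict.items_insert_of_not_contains cm _ hsk]
    rw [List.map_append, ← holditems, hideq]
    simp [hk]
  · have hcmt : cm.contains s = true := by simpa using hsk
    rw [if_neg hsk]
    by_cases hcl : c ∈ l0
    · rw [if_pos (hkin.mpr hcl), if_pos hcl]
      exact holditems
    · have hcuc' : c ∈ uc' := hcmem
      rw [if_neg (fun hxx => hcl (hkin.mp hxx)), if_neg hcl]
      have henrc : enr.contains s = true := by
        rcases hgs : cm.get? s with _ | l
        · rw [← PySem.Dict.get?_eq_none_iff_contains] at hsk
          · exact absurd hgs (by simp [hsk])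
        · have : enr.get? s = some (l.map (idxI uc)) := by rw [henrget, hgs]; rfl
          rw [PySem.Dict.contains_eq_isSome_get?, this]; rfl
      rw [PySem.Dict.items_insert_of_contains enr _ henrc,
        PySem.Dict.items_insert_of_contains cm _ hcmt, hitems,
        List.map_map, List.map_map]
      apply List.map_congr_left
      intro p hp
      simp only [Function.comp]
      by_cases hps : p.1 = s
      · rw [if_pos (by simpa using hps), if_pos (by simpa using hps)]
        congr 1
        rw [List.map_append, hmapstable l0 hl0sub, hids_eq, hk]
        rfl
      · rw [if_neg (by simpa using hps), if_neg (by simpa using hps)]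
        rw [hmapstable p.2 (hsub p hp)]
  -- goal 3: every course recorded for a student is a known course
  · have hideq : enr.getD s [] = [] := by
      rw [hids_eq, hl0, PySem.Dict.getD_of_not_contains cm [] hsk]; rfl
    rw [if_pos hsk]
    intro p hp
    rcases (PySem.Dict.mem_items_insert cm s [c] p).mp hp with rfl | ⟨hp', _⟩
    · intro c2 hc2
      have : c2 = c := by simpa using hc2
      subst this; exact hcmem
    · intro c2 hc2; exact hsubset c2 (hsub p hp' c2 hc2)
  · have hcmt : cm.contains s = true := by simpa using hsk
    rw [if_neg hsk]
    by_cases hcl : c ∈ l0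
    · rw [if_pos hcl]
      intro p hp c2 hc2; exact hsubset c2 (hsub p hp c2 hc2)
    · rw [if_neg hcl]
      intro p hp
      rcases (PySem.Dict.mem_items_insert cm s (l0 ++ [c]) p).mp hp with rfl | ⟨hp', _⟩
      · intro c2 hc2
        rcases List.mem_append.mp hc2 with h2 | h2
        · exact hsubset c2 (hl0sub c2 h2)
        · have : c2 = c := by simpa using h2
          subst this; exact hcmem
      · intro c2 hc2; exact hsubset c2 (hsub p hp' c2 hc2)

lemma inv_fold_aux (sc : List (List String)) (stA : PySem.Dict String (List String) × List String)
    (stB : PySem.Dict String Int × PySem.Dict String (List Int))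
    (h : CInv stA.1 stA.2 stB.1 stB.2) :
    CInv (sc.foldl calcStepA stA).1 (sc.foldl calcStepA stA).2
        (sc.foldl calcStepB stB).1 (sc.foldl calcStepB stB).2 := by
  induction sc generalizing stA stB with
  | nil => exact h
  | cons rec sc ih =>
    simp only [List.foldl_cons]
    exact ih _ _ (by simpa using inv_step stA.1 stA.2 stB.1 stB.2 rec (by simpa using h))

lemma inv_fold (sc : List (List String)) :
    CInv (sc.foldl calcStepA (PySem.Dict.empty, [])).1 (sc.foldl calcStepA (PySem.Dict.empty, [])).2
        (sc.foldl calcStepB (PySem.Dict.empty, PySem.Dict.empty)).1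
        (sc.foldl calcStepB (PySem.Dict.empty, PySem.Dict.empty)).2 :=
  inv_fold_aux sc _ _ inv_init

-- ---- phase 2, B side: membership in the edge set ----

lemma mem_foldl_set {α β : Type} [BEq α] [LawfulBEq α] (step : PySem.Set α → β → PySem.Set α)
    (C : β → α → Prop) (h : ∀ e b z, z ∈ step e b ↔ z ∈ e ∨ C b z)
    (l : List β) (e : PySem.Set α) (z : α) :
    z ∈ l.foldl step e ↔ z ∈ e ∨ ∃ b ∈ l, C b z := by
  induction l generalizing e with
  | nil => simp
  | cons b l ih =>
    simp only [List.foldl_cons, ih, h]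
    constructor
    · rintro ((hz | hz) | ⟨b', hb', hz⟩)
      · exact Or.inl hz
      · exact Or.inr ⟨b, by simp, hz⟩
      · exact Or.inr ⟨b', by simp [hb'], hz⟩
    · rintro (hz | ⟨b', hb', hz⟩)
      · exact Or.inl (Or.inl hz)
      · rcases List.mem_cons.mp hb' with rfl | hb'
        · exact Or.inl (Or.inr hz)
        · exact Or.inr ⟨b', hb', hz⟩

lemma mem_edges (vals : List (List Int)) (z : Int × Int) :
    z ∈ (vals.foldl (fun e ids =>
      ids.foldl (fun e a => ids.foldl (fun e b =>
        if a = b then e else PySem.Set.add e (a, b)) e) e) (PySem.Set.empty : PySem.Set (Int × Int)))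
    ↔ ∃ ids ∈ vals, z.1 ∈ ids ∧ z.2 ∈ ids ∧ z.1 ≠ z.2 := by
  have hinner : ∀ (ids : List Int) (a : Int) (e : PySem.Set (Int × Int)) (z : Int × Int),
      z ∈ ids.foldl (fun e b => if a = b then e else PySem.Set.add e (a, b)) e ↔
        z ∈ e ∨ ∃ b ∈ ids, a ≠ b ∧ z = (a, b) := by
    intro ids a e z
    apply mem_foldl_set
    intro e b z
    split
    · subst ‹a = b›; simp
    · rw [PySem.Set.mem_add]; tauto
  have hmid : ∀ (e : PySem.Set (Int × Int)) (ids : List Int) (z : Int × Int),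
      z ∈ ids.foldl (fun e a => ids.foldl (fun e b =>
          if a = b then e else PySem.Set.add e (a, b)) e) e ↔
        z ∈ e ∨ ∃ a ∈ ids, ∃ b ∈ ids, a ≠ b ∧ z = (a, b) := by
    intro e ids z
    apply mem_foldl_set
    intro e a z
    exact hinner ids a e z
  rw [mem_foldl_set _ (fun ids z => ∃ a ∈ ids, ∃ b ∈ ids, a ≠ b ∧ z = (a, b)) hmid]
  simp only [PySem.Set.empty]
  constructor
  · rintro (hz | ⟨ids, hids, a, ha, b, hb, hne, rfl⟩)
    · simp at hz
    · exact ⟨ids, hids, ha, hb, hne⟩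
  · rintro ⟨ids, hids, h1, h2, hne⟩
    exact Or.inr ⟨ids, hids, z.1, h1, z.2, h2, hne, rfl⟩

-- ---- phase 2, A side: pointwise characterisation of the in-place matrix loop ----
-- all index arithmetic is done on Nat after bridging from the Int-valued ranges

def cellN (g : List (List String)) (a b : Nat) : String := (g.getD a []).getD b ""

def setCellN (g : List (List String)) (i j : Nat) : List (List String) :=
  g.set i ((g.getD i []).set j "1")

def shapeN (n : Nat) (g : List (List String)) : Prop :=
  g.length = n ∧ ∀ row ∈ g, row.length = n

lemma setCell_eq_setCellN (g : List (List String)) (i j : Int) (hi : 0 ≤ i) (hj : 0 ≤ j) :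
    setCell g i j = setCellN g i.toNat j.toNat := by
  obtain ⟨a, rfl⟩ : ∃ a : Nat, i = (a : Int) := ⟨i.toNat, (Int.toNat_of_nonneg hi).symm⟩
  obtain ⟨b, rfl⟩ : ∃ b : Nat, j = (b : Int) := ⟨j.toNat, (Int.toNat_of_nonneg hj).symm⟩
  simp [setCell, setCellN, PySem.List.pySetD_natCast, PySem.List.pyGetD_natCast]

lemma getD_set' {α : Type} (l : List α) (i a : Nat) (v d : α) (hi : i < l.length) :
    (l.set i v).getD a d = if a = i then v else l.getD a d := by
  rw [List.getD_eq_getElem?_getD, List.getElem?_set]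
  by_cases h : i = a
  · subst h; simp [hi]
  · rw [if_neg h, if_neg (by omega), ← List.getD_eq_getElem?_getD]

lemma shapeN_setCellN {n : Nat} {g : List (List String)} (h : shapeN n g)
    {i : Nat} (j : Nat) (hi : i < n) :
    shapeN n (setCellN g i j) := by
  obtain ⟨hlen, hrows⟩ := h
  constructor
  · simp [setCellN, hlen]
  · intro row hrow
    rcases List.mem_or_eq_of_mem_set hrow with hrow | rfl
    · exact hrows row hrow
    · rw [List.length_set]
      apply hrows
      rw [List.getD_eq_getElem?_getD]
      have : i < g.length := by omega
      simp [List.getElem?_eq_getElem this]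

lemma cellN_setCellN {n : Nat} {g : List (List String)} (h : shapeN n g)
    {i j : Nat} (hi : i < n) (hj : j < n) (a b : Nat) :
    cellN (setCellN g i j) a b = if a = i ∧ b = j then "1" else cellN g a b := by
  obtain ⟨hlen, hrows⟩ := h
  have hig : i < g.length := by omega
  have hrowlen : (g.getD i []).length = n := by
    rw [List.getD_eq_getElem?_getD]
    simp [List.getElem?_eq_getElem hig]
    exact hrows _ (List.getElem_mem hig)
  rw [cellN, setCellN, getD_set' g i a _ [] hig]
  by_cases hai : a = i
  · rw [if_pos hai]
    rw [getD_set' _ j b _ "" (by omega : j < (g.getD i []).length)]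
    by_cases hbj : b = j
    · rw [if_pos hbj, if_pos ⟨hai, hbj⟩]
    · rw [if_neg hbj, if_neg (by tauto), cellN, hai]
  · rw [if_neg hai, if_neg (by tauto), cellN]

def S2N (g : List (List String)) (i j : Nat) : List (List String) :=
  setCellN (setCellN g i j) j i

lemma shapeN_S2N {n : Nat} {g : List (List String)} (h : shapeN n g)
    {i j : Nat} (hi : i < n) (hj : j < n) : shapeN n (S2N g i j) :=
  shapeN_setCellN (shapeN_setCellN h j hi) i hj

lemma cellN_S2N {n : Nat} {g : List (List String)} (h : shapeN n g)
    {i j : Nat} (hi : i < n) (hj : j < n) (a b : Nat) :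
    cellN (S2N g i j) a b = if (a, b) = (i, j) ∨ (a, b) = (j, i) then "1" else cellN g a b := by
  rw [S2N, cellN_setCellN (shapeN_setCellN h j hi) hj hi,
    cellN_setCellN h hi hj]
  simp only [Prod.mk.injEq]
  split_ifs <;> tauto

-- fold over the dict keys: one matching key sets the two symmetric cells
lemma keysfold_char {n : Nat} (cond : String → Prop) [DecidablePred cond]
    (keys : List String) {g : List (List String)} (h : shapeN n g)
    {i j : Nat} (hi : i < n) (hj : j < n) :
    shapeN n (keys.foldl (fun g k => if cond k then S2N g i j else g) g) ∧
    ∀ a b : Nat,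
      cellN (keys.foldl (fun g k => if cond k then S2N g i j else g) g) a b =
        if (∃ k ∈ keys, cond k) ∧ ((a, b) = (i, j) ∨ (a, b) = (j, i)) then "1" else cellN g a b := by
  induction keys generalizing g with
  | nil => exact ⟨h, by simp⟩
  | cons k keys ih =>
    simp only [List.foldl_cons]
    by_cases hk : cond k
    · rw [if_pos hk]
      obtain ⟨hsh, hcell⟩ := ih (shapeN_S2N h hi hj)
      refine ⟨hsh, fun a b => ?_⟩
      rw [hcell a b, cellN_S2N h hi hj]
      split_ifs with h1 h2 h3 h3 <;> simp_all <;> aesop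
    · rw [if_neg hk]
      obtain ⟨hsh, hcell⟩ := ih h
      refine ⟨hsh, fun a b => ?_⟩
      rw [hcell a b]
      split_ifs with h1 h2 h2 <;> simp_all <;> aesop

-- fold over one row of the index grid
lemma rowfold_char {n : Nat} (keys : List String) (cond : Nat → Nat → String → Prop)
    [∀ i j, DecidablePred (cond i j)]
    (J : List Nat) (hJ : ∀ j ∈ J, j < n) {i : Nat} (hi : i < n)
    {g : List (List String)} (h : shapeN n g) :
    shapeN n (J.foldl (fun g j =>
        if i = j then g
        else keys.foldl (fun g k => if cond i j k then S2N g i j else g) g) g) ∧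
    ∀ a b : Nat,
      cellN (J.foldl (fun g j =>
        if i = j then g
        else keys.foldl (fun g k => if cond i j k then S2N g i j else g) g) g) a b =
      if (∃ j ∈ J, i ≠ j ∧ (∃ k ∈ keys, cond i j k) ∧ ((a, b) = (i, j) ∨ (a, b) = (j, i))) then "1"
      else cellN g a b := by
  induction J generalizing g with
  | nil => exact ⟨h, by simp⟩
  | cons j J ih =>
    simp only [List.foldl_cons]
    have hjn : j < n := hJ j (by simp)
    have hJ' : ∀ j' ∈ J, j' < n := fun j' hj' => hJ j' (by simp [hj'])
    by_cases hij : i = j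
    · subst hij
      obtain ⟨hsh, hcell⟩ := ih hJ' h
      rw [if_pos rfl]
      refine ⟨hsh, fun a b => ?_⟩
      rw [hcell a b]
      refine if_congr ?_ rfl rfl
      constructor
      · rintro ⟨j', hm, rest⟩
        exact ⟨j', List.mem_cons_of_mem _ hm, rest⟩
      · rintro ⟨j', hj', hne, hc, ht⟩
        rcases List.mem_cons.mp hj' with rfl | hm
        · exact absurd rfl hne
        · exact ⟨j', hm, hne, hc, ht⟩
    · rw [if_neg hij]
      obtain ⟨hkf, hkcell⟩ := keysfold_char (cond i j) keys h hi hjn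
      obtain ⟨hsh, hcell⟩ := ih hJ' hkf
      refine ⟨hsh, fun a b => ?_⟩
      rw [hcell a b, hkcell a b]
      by_cases h1 : (∃ j' ∈ J, i ≠ j' ∧ (∃ k ∈ keys, cond i j' k) ∧ ((a, b) = (i, j') ∨ (a, b) = (j', i)))
      · rw [if_pos h1]
        obtain ⟨j', hm, rest⟩ := h1
        rw [if_pos ⟨j', List.mem_cons_of_mem _ hm, rest⟩]
      · rw [if_neg h1]
        by_cases h2 : (∃ k ∈ keys, cond i j k) ∧ ((a, b) = (i, j) ∨ (a, b) = (j, i))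
        · rw [if_pos h2, if_pos ⟨j, by simp, hij, h2.1, h2.2⟩]
        · have hno : ¬ (∃ j' ∈ j :: J, i ≠ j' ∧ (∃ k ∈ keys, cond i j' k) ∧ ((a, b) = (i, j') ∨ (a, b) = (j', i))) := by
            rintro ⟨j', hj', hne, hc, ht⟩
            rcases List.mem_cons.mp hj' with rfl | hm
            · exact h2 ⟨hc, ht⟩
            · exact h1 ⟨j', hm, hne, hc, ht⟩
          rw [if_neg h2, if_neg hno]

-- fold over the whole index grid
lemma matfold_char {n : Nat} (keys : List String) (cond : Nat → Nat → String → Prop)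
    [∀ i j, DecidablePred (cond i j)]
    (I J : List Nat) (hI : ∀ i ∈ I, i < n) (hJ : ∀ j ∈ J, j < n)
    {g : List (List String)} (h : shapeN n g) :
    shapeN n (I.foldl (fun g i => J.foldl (fun g j =>
        if i = j then g
        else keys.foldl (fun g k => if cond i j k then S2N g i j else g) g) g) g) ∧
    ∀ a b : Nat,
      cellN (I.foldl (fun g i => J.foldl (fun g j =>
        if i = j then g
        else keys.foldl (fun g k => if cond i j k then S2N g i j else g) g) g) g) a b =
      if (∃ i ∈ I, ∃ j ∈ J, i ≠ j ∧ (∃ k ∈ keys, cond i j k) ∧ ((a, b) = (i, j) ∨ (a, b) = (j, i)))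
      then "1" else cellN g a b := by
  induction I generalizing g with
  | nil => exact ⟨h, by simp⟩
  | cons i I ih =>
    simp only [List.foldl_cons]
    have hin : i < n := hI i (by simp)
    have hI' : ∀ i' ∈ I, i' < n := fun i' hi' => hI i' (by simp [hi'])
    obtain ⟨hrf, hrcell⟩ := rowfold_char keys cond J hJ hin h
    obtain ⟨hsh, hcell⟩ := ih hI' hrf
    refine ⟨hsh, fun a b => ?_⟩
    rw [hcell a b, hrcell a b]
    by_cases h1 : (∃ i' ∈ I, ∃ j ∈ J, i' ≠ j ∧ (∃ k ∈ keys, cond i' j k) ∧ ((a, b) = (i', j) ∨ (a, b) = (j, i')))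
    · rw [if_pos h1]
      obtain ⟨i', hm, rest⟩ := h1
      rw [if_pos ⟨i', List.mem_cons_of_mem _ hm, rest⟩]
    · rw [if_neg h1]
      by_cases h2 : (∃ j ∈ J, i ≠ j ∧ (∃ k ∈ keys, cond i j k) ∧ ((a, b) = (i, j) ∨ (a, b) = (j, i)))
      · rw [if_pos h2]
        obtain ⟨j, hj, rest⟩ := h2
        rw [if_pos ⟨i, by simp, j, hj, rest⟩]
      · have hno : ¬ (∃ i' ∈ i :: I, ∃ j ∈ J, i' ≠ j ∧ (∃ k ∈ keys, cond i' j k) ∧ ((a, b) = (i', j) ∨ (a, b) = (j, i'))) := by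
          rintro ⟨i', hi', j, hj, hne, hc, ht⟩
          rcases List.mem_cons.mp hi' with rfl | hm
          · exact h2 ⟨j, hj, hne, hc, ht⟩
          · exact h1 ⟨i', hm, j, hj, hne, hc, ht⟩
        rw [if_neg h2, if_neg hno]

-- ---- bridging casts and final assembly helpers ----

lemma setCell_natCast (g : List (List String)) (i j : Nat) :
    setCell g (i : Int) (j : Int) = setCellN g i j := by
  rw [setCell_eq_setCellN g _ _ (by exact_mod_cast Nat.zero_le i) (by exact_mod_cast Nat.zero_le j)]
  simp

lemma S2N_fold (g : List (List String)) (i j : Nat) :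
    setCellN (setCellN g i j) j i = S2N g i j := rfl

lemma range_cast (n : Nat) :
    PySem.List.pyRange 0 (n : Int) 1 = (List.range n).map (fun (k : Nat) => (k : Int)) := by
  have h1 : ((n : Int) - 0).toNat = n := by simp
  rw [PySem.List.pyRange_one, h1]
  apply List.map_congr_left
  intro k _
  simp

lemma mem_map_idxI {uc : List String} (hnd : uc.Nodup) (l : List String)
    (hl : ∀ x ∈ l, x ∈ uc) (a : Nat) (ha : a < uc.length) :
    ((a : Int) ∈ l.map (idxI uc) ↔ uc.getD a "" ∈ l) := by
  rw [List.mem_map]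
  constructor
  · rintro ⟨c', hc', he⟩
    have hidx : uc.idxOf c' = a := by
      simp only [idxI] at he
      exact_mod_cast he
    have hmem : c' ∈ uc := hl c' hc'
    have h1 : uc[a]? = some c' := by
      rw [← hidx, List.getElem?_eq_getElem (List.idxOf_lt_length_of_mem hmem),
        List.getElem_idxOf]
    rw [List.getD_eq_getElem?_getD, h1]
    exact hc'
  · intro hmem
    refine ⟨uc.getD a "", hmem, ?_⟩
    simp only [idxI]
    rw [List.getD_eq_getElem _ _ ha]
    rw [hnd.idxOf_getElem a ha]

lemma getElem_eq_cellN (g : List (List String)) (a b : Nat) (h1 : a < g.length)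
    (h2 : b < (g[a]'h1).length) : (g[a]'h1)[b]'h2 = cellN g a b := by
  rw [cellN, List.getD_eq_getElem _ _ h1, List.getD_eq_getElem _ _ h2]

-- ===== VERDICT (by name: the statement is the Claim_ definition above) =====
theorem calculate_spec : Claim_equal_calculate := by
  unfold Claim_equal_calculate Spec_calculate
  intro num sc _ _
  obtain ⟨hnd, hknd, hcik, hcig, hcis, hitems, hsub⟩ := inv_fold sc
  simp only [calculate, calculate_alt]
  set cm := (sc.foldl calcStepA (PySem.Dict.empty, [])).1 with hcm
  set uc := (sc.foldl calcStepA (PySem.Dict.empty, [])).2 with huc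
  set ci := (sc.foldl calcStepB (PySem.Dict.empty, PySem.Dict.empty)).1 with hci
  set enr := (sc.foldl calcStepB (PySem.Dict.empty, PySem.Dict.empty)).2 with henr
  set n := uc.length with hn
  rw [hcis]
  set edges := enr.values.foldl (fun e ids =>
    ids.foldl (fun e a => ids.foldl (fun e b =>
      if a = b then e else PySem.Set.add e (a, b)) e) e) (PySem.Set.empty : PySem.Set (Int × Int)) with hedges
  -- move all index arithmetic to Nat
  simp only [range_cast, List.foldl_map, List.map_map, Function.comp_def,
    PySem.List.pyGetD_natCast, setCell_natCast, S2N_fold, Nat.cast_inj,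
    List.map_const', List.length_range]
  -- the initial all-zero matrix
  set g0 := List.replicate n (List.replicate n ("0" : String)) with hg0
  have hshape0 : shapeN n g0 := by
    constructor
    · simp [hg0]
    · intro row hrow
      rw [List.eq_of_mem_replicate hrow]
      simp
  have hcell0 : ∀ a b : Nat, a < n → b < n → cellN g0 a b = "0" := by
    intro a b ha hb
    have e1 : (List.replicate n (List.replicate n ("0" : String))).getD a [] =
        List.replicate n ("0" : String) := by
      rw [List.getD_eq_getElem _ _ (by simpa using ha), List.getElem_replicate]
    rw [cellN, hg0, e1, List.getD_eq_getElem _ _ (by simpa using hb), List.getElem_replicate]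
  -- characterise A's matrix pointwise
  obtain ⟨hshape, hcell⟩ := matfold_char (n := n) cm.keys
    (fun i j key => uc.getD i "" ∈ cm.getD key [] ∧ uc.getD j "" ∈ cm.getD key [])
    (List.range n) (List.range n) (by simp) (by simp) hshape0
  -- the B-side edge set, as a predicate on Nat indices
  have hvalues : enr.values = cm.items.map (fun p => p.2.map (idxI uc)) := by
    simp [PySem.Dict.values, hitems, List.map_map, Function.comp]
  have hedge : ∀ a b : Nat, a < n → b < n → a ≠ b →
      (edges.contains ((a : Int), (b : Int)) = true ↔
        ∃ k ∈ cm.keys, uc.getD a "" ∈ cm.getD k [] ∧ uc.getD b "" ∈ cm.getD k []) := by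
    intro a b ha hb hne
    rw [PySem.Set.contains_iff, hedges, mem_edges]
    constructor
    · rintro ⟨ids, hids, h1, h2, _⟩
      rw [hvalues] at hids
      rcases List.mem_map.mp hids with ⟨p, hp, rfl⟩
      have hain := (mem_map_idxI hnd p.2 (hsub p hp) a ha).mp h1
      have hbin := (mem_map_idxI hnd p.2 (hsub p hp) b hb).mp h2
      refine ⟨p.1, ?_, ?_, ?_⟩
      · simp only [PySem.Dict.keys]
        exact List.mem_map.mpr ⟨p, hp, rfl⟩
      · rwa [PySem.Dict.getD_of_mem_items cm (by exact hp) hknd]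
      · rwa [PySem.Dict.getD_of_mem_items cm (by exact hp) hknd]
    · rintro ⟨k, hk, h1, h2⟩
      simp only [PySem.Dict.keys] at hk
      rcases List.mem_map.mp hk with ⟨p, hp, rfl⟩
      rw [PySem.Dict.getD_of_mem_items cm (by exact hp) hknd] at h1 h2
      refine ⟨p.2.map (idxI uc), ?_, ?_, ?_, ?_⟩
      · rw [hvalues]; exact List.mem_map.mpr ⟨p, hp, rfl⟩
      · exact (mem_map_idxI hnd p.2 (hsub p hp) a ha).mpr h1
      · exact (mem_map_idxI hnd p.2 (hsub p hp) b hb).mpr h2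
      · exact fun h => hne (by simpa using h)
  -- now compare the two matrices entry by entry
  apply List.ext_getElem
  · rw [hshape.1]; simp
  intro a ha1 ha2
  have han : a < n := by rw [← hshape.1]; exact ha1
  apply List.ext_getElem
  · rw [hshape.2 _ (List.getElem_mem ha1)]
    simp
  intro b hb1 hb2
  have hbn : b < n := by
    have := hb1
    rwa [hshape.2 _ (List.getElem_mem ha1)] at this
  rw [getElem_eq_cellN _ a b ha1 hb1, hcell a b]
  -- right side: entry of the comprehension
  simp only [List.getElem_map, List.getElem_range]
  -- reduce the existential over index pairs to the symmetric condition at (a, b)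
  by_cases hab : a = b
  · subst hab
    have hno : ¬ (∃ i ∈ List.range n, ∃ j ∈ List.range n, i ≠ j ∧
        (∃ k ∈ cm.keys, uc.getD i "" ∈ cm.getD k [] ∧ uc.getD j "" ∈ cm.getD k []) ∧
        ((a, a) = (i, j) ∨ (a, a) = (j, i))) := by
      rintro ⟨i, _, j, _, hne, _, ht | ht⟩ <;>
        · rw [Prod.mk.injEq] at ht
          exact hne (by omega)
    have hno2 : ¬ edges.contains ((a : Int), (a : Int)) = true := by
      intro hcont
      rw [PySem.Set.contains_iff, hedges, mem_edges] at hcont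
      obtain ⟨_, _, _, _, hne⟩ := hcont
      exact hne rfl
    rw [if_neg hno, hcell0 a a han han, if_neg hno2]
  · by_cases hhit : ∃ k ∈ cm.keys, uc.getD a "" ∈ cm.getD k [] ∧ uc.getD b "" ∈ cm.getD k []
    · rw [if_pos ⟨a, by simp [han], b, by simp [hbn], hab, hhit, Or.inl rfl⟩,
        if_pos ((hedge a b han hbn hab).mpr hhit)]
    · have hnoex : ¬ (∃ i ∈ List.range n, ∃ j ∈ List.range n, i ≠ j ∧
          (∃ k ∈ cm.keys, uc.getD i "" ∈ cm.getD k [] ∧ uc.getD j "" ∈ cm.getD k []) ∧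
          ((a, b) = (i, j) ∨ (a, b) = (j, i))) := by
        rintro ⟨i, _, j, _, hne, hk, ht | ht⟩
        · rw [Prod.mk.injEq] at ht
          obtain ⟨rfl, rfl⟩ := ht
          exact hhit hk
        · rw [Prod.mk.injEq] at ht
          obtain ⟨rfl, rfl⟩ := ht
          rcases hk with ⟨k, hkm, h1, h2⟩
          exact hhit ⟨k, hkm, h2, h1⟩
      have hnoc : ¬ edges.contains ((a : Int), (b : Int)) = true := by
        intro hcont
        exact hhit ((hedge a b han hbn hab).mp hcont)
      rw [if_neg hnoex, hcell0 a b han hbn, if_neg hnoc]
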